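-- pv_equiv track=rewrite | github.com/ariannafebbo/smithwaterman | smith_waterman/helper_functions.py | path2alignment
-- ===== SOURCE A (Python) =====
-- def path2alignment(seq1, seq2, path):
--   """
--   Given two sequences and an alignment path returns the two strings aligned
--   as specified in the path.
--
--   Parameters
--   ----------
--   seq1 : str
--     first sequence to align
--   seq2 : str
--     second sequence to align
--   path : list
--     List of coordinates representing the alignment path
--
--   Returns
--   -------
--   align1, align2 : tuple
--     align1 is a string containing the bases alignment of seq1;
--     align2 is a string containing the bases alignment of seq2
--   """
--   align1 = ""
--   align2 = ""
--
--   path.reverse()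
--
--   seq1_index = path[0][0] #ith element of 1st coordinates
--   seq2_index = path[0][1] #jth element of 1st coordinates
--   align1 += seq1[seq1_index - 1]
--   align2 += seq2[seq2_index - 1]
--
--   for ind in path[1:]: #path after the 1st coordinates
--     if (ind[0] == seq1_index):
--       align1 += '-'
--     else:
--       seq1_index = ind[0]
--       align1 += seq1[seq1_index-1]
--
--     if (ind[1] == seq2_index):
--       align2+='-'
--     else:
--       seq2_index = ind[1]
--       align2+=seq2[seq2_index-1]
--
--   return align1, align2
-- ===== SOURCE B (Python) =====
-- def _runs(coords):
--   """Run-length encode: list of (value, run_length) for maximal runs of equal values."""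
--   runs = []
--   while coords:
--     c = coords[0]
--     k = 1
--     while k < len(coords) and coords[k] == c:
--       k += 1
--     runs.append((c, k))
--     coords = coords[k:]
--   return runs
--
-- def path2alignment(seq1, seq2, path):
--   path.reverse()
--   align1 = ''.join(seq1[c - 1] + '-' * (k - 1) for c, k in _runs([p[0] for p in path]))
--   align2 = ''.join(seq2[c - 1] + '-' * (k - 1) for c, k in _runs([p[1] for p in path]))
--   return align1, align2
-- ===== Notes on version B (the rewrite author's own statement) =====
-- stated objective: alternative
-- what changed: Replaces A's single interleaved loop carrying two mutable index variables by per-axis run-length encoding of the reversed path's coordinates: each maximal run of an equal coordinate contributes that base once followed by run_length-1 dashes.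
import Mathlib
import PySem

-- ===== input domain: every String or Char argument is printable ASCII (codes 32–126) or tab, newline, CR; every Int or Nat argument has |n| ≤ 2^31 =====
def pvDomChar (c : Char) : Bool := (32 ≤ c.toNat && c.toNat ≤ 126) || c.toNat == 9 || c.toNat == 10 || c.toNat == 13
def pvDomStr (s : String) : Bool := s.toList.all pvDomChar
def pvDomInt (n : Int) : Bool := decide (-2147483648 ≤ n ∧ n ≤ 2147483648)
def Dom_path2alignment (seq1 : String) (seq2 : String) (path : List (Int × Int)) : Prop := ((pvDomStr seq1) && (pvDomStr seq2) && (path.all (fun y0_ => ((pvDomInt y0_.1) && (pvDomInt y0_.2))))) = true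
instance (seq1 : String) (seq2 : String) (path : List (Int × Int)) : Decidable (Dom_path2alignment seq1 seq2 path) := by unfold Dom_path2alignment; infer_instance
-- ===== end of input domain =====

-- B run-length-encodes each coordinate axis of the reversed path and emits, per run, the base
-- once plus run_length-1 dashes, instead of A's interleaved loop with two mutable index
-- variables; equivalence is about the RETURN value — both Pythons also reverse `path` in
-- place, identically.

-- ===== PORT A =====
def path2alignment (seq1 : String) (seq2 : String) (path : List (Int × Int)) : String × String :=
  let p := path.reverse
  match p with
  | [] => ("", "")  -- Python raises IndexError here (path[0]); excluded by Pre_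
  | h :: rest =>
    -- align1 += seq1[seq1_index - 1]; align2 += seq2[seq2_index - 1]
    let a1 := "".push ((PySem.Str.pyGet? seq1 (h.1 - 1)).getD ' ')
    let a2 := "".push ((PySem.Str.pyGet? seq2 (h.2 - 1)).getD ' ')
    let st := rest.foldl (fun (acc : String × String × Int × Int) ind =>
      let r1 := if ind.1 == acc.2.2.1 then (acc.1.push '-', acc.2.2.1)
                else (acc.1.push ((PySem.Str.pyGet? seq1 (ind.1 - 1)).getD ' '), ind.1)
      let r2 := if ind.2 == acc.2.2.2 then (acc.2.1.push '-', acc.2.2.2)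
                else (acc.2.1.push ((PySem.Str.pyGet? seq2 (ind.2 - 1)).getD ' '), ind.2)
      (r1.1, r2.1, r1.2, r2.2)) (a1, a2, h.1, h.2)
    (st.1, st.2.1)

-- ===== PORT B =====
-- _runs: the inner `while coords[k] == c` is the span/takeWhile of the rest, the outer loop
-- the recursion on the remaining suffix (exact transcription of Source B's nested while loops).
def pvRuns : List Int → List (Int × Nat)
  | [] => []
  | c :: cs =>
    let s := cs.span (· == c)
    (c, s.1.length + 1) :: pvRuns s.2
termination_by cs => cs.length
decreasing_by
  simp only [List.span_eq_takeWhile_dropWhile]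
  have := List.length_dropWhile_le (p := (· == c)) (l := cs)
  simp only [List.length_cons]; omega

-- one run's contribution: seq[c-1] + '-' * (k-1)
def pvEmit (seq : String) (r : Int × Nat) : List Char :=
  (PySem.Str.pyGet? seq (r.1 - 1)).getD ' ' :: List.replicate (r.2 - 1) '-'

def pvAligned (seq : String) (coords : List Int) : String :=
  String.ofList ((pvRuns coords).flatMap (pvEmit seq))

def path2alignment_alt (seq1 : String) (seq2 : String) (path : List (Int × Int)) : String × String :=
  let p := path.reverse
  (pvAligned seq1 (p.map Prod.fst), pvAligned seq2 (p.map Prod.snd))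

-- ===== PRECONDITION & SPEC =====
-- Pre_ excludes exactly the inputs where Python A raises IndexError: an empty path, or a
-- coordinate that is actually indexed (the first one, or any one differing from its
-- predecessor) falling outside Python's index range for its sequence.
def Pre_path2alignment (seq1 : String) (seq2 : String) (path : List (Int × Int)) : Prop :=
  path ≠ [] ∧
  (∀ h ∈ path.reverse.take 1,
    PySem.Raise.InRange seq1.length (h.1 - 1) ∧ PySem.Raise.InRange seq2.length (h.2 - 1)) ∧
  (∀ pc ∈ List.zip path.reverse path.reverse.tail,
    (pc.2.1 ≠ pc.1.1 → PySem.Raise.InRange seq1.length (pc.2.1 - 1)) ∧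
    (pc.2.2 ≠ pc.1.2 → PySem.Raise.InRange seq2.length (pc.2.2 - 1)))
instance (seq1 : String) (seq2 : String) (path : List (Int × Int)) : Decidable (Pre_path2alignment seq1 seq2 path) := by unfold Pre_path2alignment; infer_instance

def pvWitness_path2alignment : String × String × (List (Int × Int)) :=
  ("ACGT", "AGT", [(4, 3), (3, 2), (2, 2), (1, 1)])

def Spec_path2alignment (seq1 : String) (seq2 : String) (path : List (Int × Int)) (out : String × String) : Prop := out = path2alignment_alt seq1 seq2 path
instance (seq1 : String) (seq2 : String) (path : List (Int × Int)) (out : String × String) : Decidable (Spec_path2alignment seq1 seq2 path out) := by unfold Spec_path2alignment; infer_instance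

-- ===== CLAIM (what is proved, stated in full; the proofs are below) =====
def Claim_equal_path2alignment : Prop := ∀ (seq1 : String) (seq2 : String) (path : List (Int × Int)), Dom_path2alignment seq1 seq2 path → Pre_path2alignment seq1 seq2 path → Spec_path2alignment seq1 seq2 path (path2alignment seq1 seq2 path)

-- ===== LEMMAS AND PROOFS =====

theorem pvPush (s : String) (c : Char) : s.push c = String.ofList (s.toList ++ [c]) := by
  rw [String.toList_inj.symm]; simp

theorem pvLastMap {α β : Type} (f : α → β) (l : List α) (d : α) :
    (l.map f).getLastD (f d) = f (l.getLastD d) := by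
  induction l generalizing d with
  | nil => simp
  | cons x xs ih => rw [List.map_cons, List.getLastD_cons, List.getLastD_cons, ih]

-- common characterisation of both versions' output after the first character, on one axis
def pvTail (seq : String) (prev : Int) (cs : List Int) : List Char :=
  match cs with
  | [] => []
  | c :: cs' =>
    (if c == prev then '-' else (PySem.Str.pyGet? seq (c - 1)).getD ' ') :: pvTail seq c cs'

theorem pvA_fold (seq1 seq2 : String) (rest : List (Int × Int)) :
    ∀ (a1 a2 : List Char) (i1 i2 : Int),
    rest.foldl (fun (acc : String × String × Int × Int) ind =>
      let r1 := if ind.1 == acc.2.2.1 then (acc.1.push '-', acc.2.2.1)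
                else (acc.1.push ((PySem.Str.pyGet? seq1 (ind.1 - 1)).getD ' '), ind.1)
      let r2 := if ind.2 == acc.2.2.2 then (acc.2.1.push '-', acc.2.2.2)
                else (acc.2.1.push ((PySem.Str.pyGet? seq2 (ind.2 - 1)).getD ' '), ind.2)
      (r1.1, r2.1, r1.2, r2.2)) (String.ofList a1, String.ofList a2, i1, i2)
    = (String.ofList (a1 ++ pvTail seq1 i1 (rest.map Prod.fst)),
       String.ofList (a2 ++ pvTail seq2 i2 (rest.map Prod.snd)),
       (rest.map Prod.fst).getLastD i1, (rest.map Prod.snd).getLastD i2) := by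
  induction rest with
  | nil => intro a1 a2 i1 i2; simp [pvTail]
  | cons ind rest ih =>
    intro a1 a2 i1 i2
    simp only [beq_iff_eq, pvPush, String.toList_ofList] at ih ⊢
    by_cases h1 : ind.1 = i1 <;> by_cases h2 : ind.2 = i2 <;>
      simp only [List.foldl_cons, h1, h2, if_true, if_false] <;>
      rw [ih] <;>
      simp only [List.map_cons, h1, h2, List.getLastD_cons, pvLastMap, pvTail, beq_iff_eq,
        eq_self_iff_true, if_true, ite_true, ite_false, List.cons_append, List.append_assoc,
        List.singleton_append] <;>
      simp [pvTail, h1, h2, ← List.getLastD_eq_getLast?, List.getLastD_cons, pvLastMap]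

theorem pvTail_const (seq : String) (c : Int) :
    ∀ (same r : List Int), (∀ x ∈ same, x = c) →
    pvTail seq c (same ++ r) = List.replicate same.length '-' ++ pvTail seq c r := by
  intro same
  induction same with
  | nil => intro r _; simp
  | cons x xs ih =>
    intro r hall
    have hx : x = c := hall x (by simp)
    simp only [List.cons_append, pvTail, hx, beq_self_eq_true, if_true, List.length_cons,
      List.replicate_succ, List.cons_append]
    rw [ih r (fun y hy => hall y (by simp [hy]))]

theorem pvRuns_flat (seq : String) :
    ∀ (n : Nat) (cs : List Int) (c : Int), cs.length ≤ n →
    (pvRuns (c :: cs)).flatMap (pvEmit seq)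
      = (PySem.Str.pyGet? seq (c - 1)).getD ' ' :: pvTail seq c cs := by
  intro n
  induction n with
  | zero =>
    intro cs c hle
    have : cs = [] := List.eq_nil_of_length_eq_zero (Nat.le_zero.mp hle)
    subst this
    simp [pvRuns, pvEmit, pvTail]
  | succ n ih =>
    intro cs c hle
    rw [pvRuns]
    simp only [List.span_eq_takeWhile_dropWhile, List.flatMap_cons]
    have hdecomp : cs.takeWhile (· == c) ++ cs.dropWhile (· == c) = cs :=
      List.takeWhile_append_dropWhile
    have hsame : ∀ x ∈ cs.takeWhile (· == c), x = c := by
      intro x hx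
      have := List.mem_takeWhile_imp (l := cs) (p := (· == c)) hx
      exact beq_iff_eq.mp this
    have htail : pvTail seq c cs
        = List.replicate (cs.takeWhile (· == c)).length '-'
          ++ pvTail seq c (cs.dropWhile (· == c)) := by
      conv_lhs => rw [← hdecomp]
      exact pvTail_const seq c _ _ hsame
    have hlen : (cs.dropWhile (· == c)).length ≤ cs.length := List.length_dropWhile_le _ _
    cases hdw : cs.dropWhile (· == c) with
    | nil =>
      simp [pvEmit, htail, hdw, pvTail, pvRuns]
    | cons d t =>
      have hne' : cs.dropWhile (· == c) ≠ [] := by simp [hdw]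
      have hd : ¬ (d == c) = true := by
        have := List.head_dropWhile_not (· == c) hne'
        simpa [hdw] using this
      have ht : t.length ≤ n := by
        have := hlen; rw [hdw] at this; simp only [List.length_cons] at this; omega
      rw [ih t d ht]
      simp [pvEmit, htail, hdw, pvTail, hd]

theorem pvAligned_cons (seq : String) (c : Int) (cs : List Int) :
    pvAligned seq (c :: cs)
      = String.ofList ((PySem.Str.pyGet? seq (c - 1)).getD ' ' :: pvTail seq c cs) := by
  unfold pvAligned
  rw [pvRuns_flat seq cs.length cs c (le_refl _)]

-- ===== VERDICT =====
theorem path2alignment_spec : Claim_equal_path2alignment := by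
  intro seq1 seq2 path _hdom hpre
  unfold Spec_path2alignment path2alignment path2alignment_alt
  obtain ⟨hne, -, -⟩ := hpre
  have hrev : path.reverse ≠ [] := by simpa using hne
  cases hp : path.reverse with
  | nil => exact absurd hp hrev
  | cons h rest =>
    have e1 : ∀ c : Char, ("".push c) = String.ofList [c] := fun c => by rw [pvPush]; simp
    simp only [e1, pvA_fold, List.map_cons, pvAligned_cons]
    simp
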